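-- pv_equiv track=rewrite | github.com/RyanLowry/Coding-Challenges | FlipCharacters/main.py | countYAndPositions
-- ===== SOURCE A (Python) =====
-- def countYAndPositions(value):
--     yPositions = []
--     newInd = 0
--     for ind,i in enumerate(value):
--         # resets the last y values to find trailing y's
--         if i == 'x':
--             newInd = 0
--         else:
--             yPositions.append(ind)
--             newInd += 1
--     # slicing string/arrays with 0 would cause incorrect values, a check in case an x is at the end of the string
--     if newInd == 0:
--         yCount = value.count("y")
--     else:
--         yCount = value[:-newInd].count("y")
--         # we don't want the trailing y's so we remove them from the array
--         yPositions = yPositions[:-newInd]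
--     return [yPositions,yCount]
-- ===== SOURCE B (Python) =====
-- def countYAndPositions(value):
--     cut = value.rfind('x') + 1
--     pre = value[:cut]
--     yPositions = [i for i, c in enumerate(pre) if c != 'x']
--     return [yPositions, pre.count('y')]
-- ===== Notes on version B (the rewrite author's own statement) =====
-- stated objective: simpler
-- what changed: Replaced A's reset-counter tracking of the trailing run and its newInd==0 special case with a direct boundary lookup (str.rfind plus one) followed by a single scan of that prefix.
import Mathlib
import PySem

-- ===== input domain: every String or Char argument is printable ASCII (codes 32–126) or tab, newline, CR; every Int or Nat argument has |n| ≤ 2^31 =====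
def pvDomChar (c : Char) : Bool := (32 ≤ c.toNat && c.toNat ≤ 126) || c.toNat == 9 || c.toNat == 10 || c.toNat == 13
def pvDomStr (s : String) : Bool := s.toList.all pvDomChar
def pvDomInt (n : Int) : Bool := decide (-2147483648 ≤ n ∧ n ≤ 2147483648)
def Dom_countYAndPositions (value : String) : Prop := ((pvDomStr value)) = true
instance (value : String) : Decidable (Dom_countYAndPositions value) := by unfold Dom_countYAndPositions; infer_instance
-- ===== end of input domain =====

-- B replaces A's reset-counter tracking of the trailing non-'x' run by a direct
-- rfind('x')+1 boundary followed by one scan of that prefix; objective: simpler.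

-- ===== PORT A =====
def countYAndPositions (value : String) : List Int × Int :=
  let st := (PySem.List.enumerate value.toList 0).foldl
      (fun (st : List Int × Int) p =>
        if p.2 = 'x' then (st.1, 0) else (st.1 ++ [p.1], st.2 + 1)) ([], 0)
  if st.2 = 0 then
    (st.1, (PySem.Str.count value "y" : Int))
  else
    (PySem.List.slice st.1 none (some (-st.2)),
     (PySem.Str.count (PySem.Str.slice value none (some (-st.2))) "y" : Int))

-- ===== PORT B =====
def countYAndPositions_alt (value : String) : List Int × Int :=
  let cut : Int := PySem.Str.rfind value "x" + 1
  let pre := PySem.Str.slice value none (some cut)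
  (((PySem.List.enumerate pre.toList 0).filter (fun p => p.2 != 'x')).map (·.1),
   (PySem.Str.count pre "y" : Int))

-- ===== PRECONDITION & SPEC =====
def Spec_countYAndPositions (value : String) (out : List Int × Int) : Prop := out = countYAndPositions_alt value
instance (value : String) (out : List Int × Int) : Decidable (Spec_countYAndPositions value out) := by unfold Spec_countYAndPositions; infer_instance

-- ===== CLAIM (what is proved, stated in full; the proofs are below) =====
def Claim_equal_countYAndPositions : Prop := ∀ (value : String), Dom_countYAndPositions value → Spec_countYAndPositions value (countYAndPositions value)

-- ===== LEMMAS AND PROOFS =====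

-- positions of non-'x' chars, A's appended list, starting at index i
def pvF : List Char → Int → List Int
  | [], _ => []
  | c :: l, i => if c = 'x' then pvF l (i+1) else i :: pvF l (i+1)

-- A's newInd counter after processing the list, starting from n
def pvG : List Char → Int → Int
  | [], n => n
  | c :: l, n => if c = 'x' then pvG l 0 else pvG l (n+1)

@[simp] theorem pvF_nil (i : Int) : pvF [] i = [] := rfl
theorem pvF_cons (c : Char) (l : List Char) (i : Int) :
    pvF (c :: l) i = if c = 'x' then pvF l (i+1) else i :: pvF l (i+1) := rfl
@[simp] theorem pvG_nil (n : Int) : pvG [] n = n := rfl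
theorem pvG_cons (c : Char) (l : List Char) (n : Int) :
    pvG (c :: l) n = if c = 'x' then pvG l 0 else pvG l (n+1) := rfl

theorem pvLoop_eq (l : List Char) (i : Int) (pos : List Int) (n : Int) :
    (PySem.List.enumerate l i).foldl
      (fun (st : List Int × Int) p =>
        if p.2 = 'x' then (st.1, 0) else (st.1 ++ [p.1], st.2 + 1)) (pos, n)
    = (pos ++ pvF l i, pvG l n) := by
  induction l generalizing i pos n with
  | nil => simp
  | cons c l ih =>
      rw [PySem.List.enumerate_cons]
      by_cases hc : c = 'x' <;>
        simp [pvF_cons, pvG_cons, hc, ih, List.append_assoc]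

theorem pvPosB_eq (l : List Char) (i : Int) :
    ((PySem.List.enumerate l i).filter (fun p => p.2 != 'x')).map (·.1) = pvF l i := by
  induction l generalizing i with
  | nil => simp
  | cons c l ih =>
      rw [PySem.List.enumerate_cons]
      by_cases hc : c = 'x' <;> simp [pvF_cons, hc, ih]

theorem pvF_append (a b : List Char) (i : Int) :
    pvF (a ++ b) i = pvF a i ++ pvF b (i + a.length) := by
  induction a generalizing i with
  | nil => simp
  | cons c a ih =>
      by_cases hc : c = 'x' <;>
        simp [pvF_cons, hc, ih, add_assoc, add_comm (1 : Int)]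

theorem pvG_append (a b : List Char) (n : Int) :
    pvG (a ++ b) n = pvG b (pvG a n) := by
  induction a generalizing n with
  | nil => simp
  | cons c a ih => by_cases hc : c = 'x' <;> simp [pvG_cons, hc, ih]

theorem pvG_nox (v : List Char) (hv : ∀ c ∈ v, c ≠ 'x') (n : Int) :
    pvG v n = n + v.length := by
  induction v generalizing n with
  | nil => simp
  | cons c v ih =>
      have hc : c ≠ 'x' := hv c (by simp)
      rw [pvG_cons, if_neg hc, ih (fun d hd => hv d (List.mem_cons_of_mem _ hd))]
      push_cast [List.length_cons]; ring

theorem pvF_length_nox (v : List Char) (hv : ∀ c ∈ v, c ≠ 'x') (i : Int) :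
    (pvF v i).length = v.length := by
  induction v generalizing i with
  | nil => simp
  | cons c v ih =>
      have hc : c ≠ 'x' := hv c (by simp)
      simp [pvF_cons, hc, ih (fun d hd => hv d (List.mem_cons_of_mem _ hd))]

theorem pvG_lastx (u : List Char) (hu : u.getLast? = some 'x') (n : Int) :
    pvG u n = 0 := by
  rcases List.eq_nil_or_concat u with rfl | ⟨a, c, rfl⟩
  · simp at hu
  · have hc : c = 'x' := by simpa using hu
    subst hc
    rw [List.concat_eq_append, pvG_append]
    simp [pvG_cons]

-- decomposition: every list is u ++ v with v 'x'-free and u empty or ending in 'x'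
theorem pvSplit (cs : List Char) :
    ∃ u v, cs = u ++ v ∧ (∀ c ∈ v, c ≠ 'x') ∧ (u = [] ∨ u.getLast? = some 'x') := by
  induction cs with
  | nil => exact ⟨[], [], by simp, by simp, Or.inl rfl⟩
  | cons c cs ih =>
      obtain ⟨u, v, rfl, hv, hu⟩ := ih
      rcases hu with rfl | hu
      · by_cases hc : c = 'x'
        · exact ⟨[c], v, by simp, hv, Or.inr (by simp [hc])⟩
        · exact ⟨[], c :: v, by simp, by
            intro d hd; rcases List.mem_cons.mp hd with rfl | hd
            · exact hc
            · exact hv d hd, Or.inl rfl⟩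
      · refine ⟨c :: u, v, by simp, hv, Or.inr ?_⟩
        rcases List.eq_nil_or_concat u with rfl | ⟨a, b, rfl⟩
        · simp at hu
        · have hb : b = 'x' := by simpa using hu
          subst hb
          rw [show c :: a.concat 'x' = (c :: a) ++ ['x'] by simp]
          exact List.getLast?_concat

def pvTrail (l : List Char) : Nat := (l.reverse.takeWhile (fun c => c ≠ 'x')).length

theorem pvTakeWhile_append {α : Type} (p : α → Bool) (a b : List α)
    (h : ∀ x ∈ a, p x = true) : (a ++ b).takeWhile p = a ++ b.takeWhile p := by
  induction a with
  | nil => simp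
  | cons x a ih =>
      have := h x (by simp)
      simp [this, ih (fun y hy => h y (List.mem_cons_of_mem _ hy))]

theorem pvTakeWhile_revx (p : Char → Bool) (hp : p 'x' = false) (u : List Char)
    (hu : u = [] ∨ u.getLast? = some 'x') : u.reverse.takeWhile p = [] := by
  rcases hu with rfl | hu
  · simp
  · have hh : u.reverse.head? = some 'x' := by rw [List.head?_reverse]; exact hu
    cases hrev2 : u.reverse with
    | nil => simp
    | cons a t =>
        have ha : a = 'x' := by rw [hrev2] at hh; simpa using hh
        subst ha
        simp [hp]

theorem pvGo_eq (cs : List Char) (j : Nat) :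
    PySem.Chars.rfind.go cs ['x'] j =
      if 'x' ∈ cs.take (j+1) then ((cs.take (j+1)).length : Int) - 1 - pvTrail (cs.take (j+1))
      else -1 := by
  induction j with
  | zero =>
      rw [PySem.Chars.rfind.go]
      cases cs with
      | nil => simp
      | cons c l =>
          by_cases hc : c = 'x'
          · subst hc
            simp [List.isPrefixOf, pvTrail]
          · simp [List.isPrefixOf, show ¬'x' = c from fun hx => hc hx.symm]
  | succ j ih =>
      rw [PySem.Chars.rfind.go]
      rcases h : cs[j+1]? with _ | c
      · have hlen : cs.length ≤ j + 1 := List.getElem?_eq_none_iff.mp h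
        have hdrop : cs.drop (j+1) = [] := List.drop_eq_nil_of_le hlen
        have htake : cs.take (j+1) = cs := List.take_of_length_le hlen
        have htake2 : cs.take (j+2) = cs := List.take_of_length_le (by omega)
        rw [hdrop, htake2]
        have hpf : ((['x'] : List Char).isPrefixOf []) = false := rfl
        rw [hpf]
        rw [htake] at ih
        simpa using ih
      · have hlt : j + 1 < cs.length := by
          by_contra hge
          rw [List.getElem?_eq_none_iff.mpr (by omega)] at h
          simp at h
        have hget : cs[j+1] = c := by
          have := List.getElem?_eq_getElem hlt
          rw [h] at this; exact (Option.some_inj.mp this).symm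
        have hdrop : cs.drop (j+1) = c :: cs.drop (j+2) := by
          rw [List.drop_eq_getElem_cons hlt, hget]
        have htake2 : cs.take (j+2) = cs.take (j+1) ++ [c] := by
          rw [List.take_add_one, h]; rfl
        have hlen1 : (cs.take (j+1)).length = j + 1 :=
          List.length_take_of_le (by omega)
        by_cases hc : c = 'x'
        · subst hc
          have htr : pvTrail (cs.take (j+1) ++ ['x']) = 0 := by
            simp [pvTrail]
          have hpf : (['x'].isPrefixOf ('x' :: cs.drop (j+2))) = true := by
            simp [List.isPrefixOf]
          rw [hdrop, htake2, hpf]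
          simp [htr, hlen1]
        · have htr : pvTrail (cs.take (j+1) ++ [c]) = pvTrail (cs.take (j+1)) + 1 := by
            simp [pvTrail, hc]
          have hmem : 'x' ∈ cs.take (j+1) ++ [c] ↔ 'x' ∈ cs.take (j+1) := by
            rw [List.mem_append]
            constructor
            · rintro (h | h)
              · exact h
              · exact absurd (List.mem_singleton.mp h).symm hc
            · exact Or.inl
          have hpf : (['x'].isPrefixOf (c :: cs.drop (j+2))) = false := by
            simp only [List.isPrefixOf, Bool.and_eq_false_iff, beq_eq_false_iff_ne]
            exact Or.inl fun h => hc h.symm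
          rw [hdrop, htake2, hpf]
          simp only [Bool.false_eq_true, if_false, ih, hmem, htr,
            List.length_append, List.length_cons, List.length_nil, hlen1]
          by_cases hm : 'x' ∈ cs.take (j+1)
          · rw [if_pos hm, if_pos hm]; push_cast; ring
          · rw [if_neg hm, if_neg hm]

theorem pvRfind_eq (cs : List Char) :
    PySem.Chars.rfind cs ['x'] =
      if 'x' ∈ cs then (cs.length : Int) - 1 - pvTrail cs else -1 := by
  have h := pvGo_eq cs cs.length
  rw [List.take_of_length_le (by omega)] at h
  simpa [PySem.Chars.rfind] using h

theorem pvTrail_split (u v : List Char) (hv : ∀ c ∈ v, c ≠ 'x')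
    (hu : u = [] ∨ u.getLast? = some 'x') : pvTrail (u ++ v) = v.length := by
  unfold pvTrail
  rw [List.reverse_append,
      pvTakeWhile_append _ _ _ (by
        intro x hx
        simp only [decide_eq_true_eq]
        exact hv x (List.mem_reverse.mp hx)),
      pvTakeWhile_revx _ (by simp) u hu]
  simp

theorem pvMemX_split (u v : List Char) (hv : ∀ c ∈ v, c ≠ 'x')
    (hu : u = [] ∨ u.getLast? = some 'x') : ('x' ∈ u ++ v) ↔ u ≠ [] := by
  constructor
  · intro h
    rcases List.mem_append.mp h with h | h
    · intro h'; subst h'; simp at h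
    · exact absurd rfl (hv _ h)
  · intro h
    rcases hu with rfl | hu
    · exact absurd rfl h
    · exact List.mem_append.mpr (Or.inl (List.mem_of_getLast? hu))

-- ===== VERDICT (by name: the statement is the Claim_ definition above) =====
theorem countYAndPositions_spec : Claim_equal_countYAndPositions := by
  intro value _
  unfold Spec_countYAndPositions countYAndPositions countYAndPositions_alt
  obtain ⟨u, v, hcat, hv, hu⟩ := pvSplit value.toList
  -- cut = u.length
  have hrfind : PySem.Str.rfind value "x" + 1 = (u.length : Int) := by
    rw [PySem.Str.rfind_eq]
    show PySem.Chars.rfind value.toList "x".toList + 1 = _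
    have hx : "x".toList = ['x'] := rfl
    rw [hx, pvRfind_eq, hcat, pvTrail_split u v hv hu]
    by_cases h : u = []
    · subst h; simp
    · rw [if_pos ((pvMemX_split u v hv hu).mpr h)]
      simp only [List.length_append]
      push_cast; ring
  -- the prefix value[:cut] is exactly u
  have hpre : (PySem.Str.slice value none (some ((u.length : Int)))).toList = u := by
    rw [PySem.Str.toList_slice, PySem.Chars.slice_eq_listSlice,
        PySem.List.slice_to_natCast, hcat, List.take_left]
  have hloop := pvLoop_eq value.toList 0 [] 0
  have hG : pvG value.toList 0 = (v.length : Int) := by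
    rw [hcat, pvG_append]
    have hu0 : pvG u 0 = 0 := by
      rcases hu with rfl | hu
      · simp
      · exact pvG_lastx u hu 0
    rw [hu0, pvG_nox v hv]
    simp
  have hF : pvF value.toList 0 = pvF u 0 ++ pvF v u.length := by
    rw [hcat, pvF_append]; simp
  simp only [hloop, List.nil_append, hG, hF, hrfind, pvPosB_eq, hpre]
  by_cases hvnil : v = []
  · subst hvnil
    rw [if_pos (by simp)]
    simp only [Prod.mk.injEq]
    refine ⟨by simp, ?_⟩
    congr 1
    rw [PySem.Str.count_eq, PySem.Str.count_eq, hpre, hcat]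
    simp
  · have hvpos : 0 < v.length := List.length_pos_iff.mpr hvnil
    rw [if_neg (by
      intro h
      exact hvnil (List.length_eq_zero_iff.mp (by exact_mod_cast h)))]
    simp only [Prod.mk.injEq]
    constructor
    · rw [PySem.List.slice_to_neg_natCast _ _ hvpos,
          List.length_append, pvF_length_nox v hv,
          Nat.add_sub_cancel, List.take_left]
    · have hsl : (PySem.Str.slice value none (some (-((v.length : Nat) : Int)))).toList = u := by
        rw [PySem.Str.toList_slice, PySem.Chars.slice_eq_listSlice,
            PySem.List.slice_to_neg_natCast _ _ hvpos, hcat]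
        simp
      rw [PySem.Str.count_eq, PySem.Str.count_eq, hsl, hpre]
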